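-- pv_equiv track=rewrite | github.com/raistlinJ/core-topo-gen | archive/gui_rough_draft.py | generate_random_links
-- ===== SOURCE A (Python) =====
-- def generate_random_links(device_id_map):
--     links = []
--     seen_links = set()
--
--     # Group devices by type
--     routers = [dev_id for dev_id, dev_type in device_id_map.items() if dev_type.lower() == "router"]
--     switch_and_hubs = [dev_id for dev_id, dev_type in device_id_map.items() if dev_type.lower() in ("switch", "hub")]
--     pcs = [dev_id for dev_id, dev_type in device_id_map.items() if dev_type.lower() == "pc"]
--
--     # Link routers to each other (full mesh)
--     for i in range(len(routers)):
--         for j in range(i + 1, len(routers)):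
--             r1, r2 = routers[i], routers[j]
--             link = tuple(sorted((r1, r2)))
--             if link not in seen_links:
--                 links.append([r1, r2])
--                 seen_links.add(link)
--
--     # Attach each switch/hub to a router
--     router_index = 0
--     for device_id in switch_and_hubs:
--         if routers:
--             router_id = routers[router_index % len(routers)]
--             link = tuple(sorted((device_id, router_id)))
--             if link not in seen_links:
--                 links.append([device_id, router_id])
--                 seen_links.add(link)
--             router_index += 1
--
--     # Attach PCs to routers or switch/hubs
--     parent_devices = switch_and_hubs + routers
--     parent_index = 0
--     for pc in pcs:
--         for _ in range(len(parent_devices)):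
--             parent = parent_devices[parent_index % len(parent_devices)]
--             link = tuple(sorted((pc, parent)))
--             if link not in seen_links:
--                 links.append([pc, parent])
--                 seen_links.add(link)
--                 parent_index += 1
--                 break
--             parent_index += 1
--
--     return links
-- ===== SOURCE B (Python) =====
-- def _mesh(routers):
--     # full mesh over distinct router ids, recursively: head linked to each later router
--     if not routers:
--         return []
--     head, rest = routers[0], routers[1:]
--     return [[head, r2] for r2 in rest] + _mesh(rest)
--
--
-- def generate_random_links(device_id_map):
--     # one pass grouping by (lowercased) type
--     routers, switch_and_hubs, pcs = [], [], []
--     for dev_id, dev_type in device_id_map.items():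
--         t = dev_type.lower()
--         if t == "router":
--             routers.append(dev_id)
--         elif t in ("switch", "hub"):
--             switch_and_hubs.append(dev_id)
--         elif t == "pc":
--             pcs.append(dev_id)
--
--     links = _mesh(routers)
--
--     # round-robin: switch/hubs onto routers
--     if routers:
--         for idx, device_id in enumerate(switch_and_hubs):
--             links.append([device_id, routers[idx % len(routers)]])
--
--     # round-robin: PCs onto switch/hubs then routers
--     parent_devices = switch_and_hubs + routers
--     if parent_devices:
--         for idx, pc in enumerate(pcs):
--             links.append([pc, parent_devices[idx % len(parent_devices)]])
--
--     return links
-- ===== Notes on version B (the rewrite author's own statement) =====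
-- stated objective: simpler
-- what changed: B drops A's seen_links set and its tuple(sorted(...)) keys entirely (device ids are distinct dict keys, so no link can repeat), builds the router mesh by a recursive head-to-rest helper instead of index-pair loops, groups devices in one pass instead of three comprehensions, and attaches each PC by direct round-robin indexing instead of A's inner probe loop with break.
import Mathlib
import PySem

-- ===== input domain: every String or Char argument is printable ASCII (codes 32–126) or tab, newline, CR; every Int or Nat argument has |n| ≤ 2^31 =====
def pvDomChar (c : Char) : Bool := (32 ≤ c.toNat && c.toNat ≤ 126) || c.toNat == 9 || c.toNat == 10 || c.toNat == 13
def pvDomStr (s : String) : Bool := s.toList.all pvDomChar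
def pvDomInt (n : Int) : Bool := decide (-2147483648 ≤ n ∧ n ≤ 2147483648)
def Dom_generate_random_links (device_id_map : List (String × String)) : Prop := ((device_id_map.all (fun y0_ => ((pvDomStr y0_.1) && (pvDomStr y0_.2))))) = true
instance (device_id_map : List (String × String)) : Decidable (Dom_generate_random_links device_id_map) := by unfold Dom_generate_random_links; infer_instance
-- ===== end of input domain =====

-- B replaces A's index-driven double loop, seen-link bookkeeping set and inner linear probe
-- by a recursive mesh over the router list and direct round-robin indexing (objective: simpler).

-- ===== PORT A =====
-- tuple(sorted((x, y))): the key stored in A's seen_links set (the tuple is ported as a 2-element list)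
def grlKey (x y : String) : List String := PySem.List.sorted [x, y] (fun s => s) false

-- 'if link not in seen_links: links.append([x, y]); seen_links.add(link)'
def grlStep (st : List (List String) × PySem.Set (List String)) (p : String × String) :
    List (List String) × PySem.Set (List String) :=
  if PySem.Set.contains st.2 (grlKey p.1 p.2) then st
  else (st.1 ++ [[p.1, p.2]], PySem.Set.add st.2 (grlKey p.1 p.2))

-- the inner 'for _ in range(len(parent_devices)): … break' loop of A's PC phase
def grlPcLoop (parents : List String) (pc : String) :
    Nat → List (List String) × PySem.Set (List String) × Int →
    List (List String) × PySem.Set (List String) × Int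
  | 0, st => st
  | n+1, (links, seen, pidx) =>
    let parent := PySem.List.pyGetD parents (PySem.Int.mod pidx (parents.length : Int)) ""
    if PySem.Set.contains seen (grlKey pc parent) then
      grlPcLoop parents pc n (links, seen, pidx + 1)
    else (links ++ [[pc, parent]], PySem.Set.add seen (grlKey pc parent), pidx + 1)

-- the loop body of A's switch/hub phase ('if routers: …; router_index += 1')
def grlSwitchStep (routers : List String)
    (st : List (List String) × PySem.Set (List String) × Int) (device_id : String) :
    List (List String) × PySem.Set (List String) × Int :=
  if routers.isEmpty then st
  else
    let router_id := PySem.List.pyGetD routers (PySem.Int.mod st.2.2 (routers.length : Int)) ""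
    let st' := grlStep (st.1, st.2.1) (device_id, router_id)
    (st'.1, st'.2, st.2.2 + 1)

def generate_random_links (device_id_map : List (String × String)) : List (List String) :=
  let routers := (device_id_map.filter (fun p => PySem.Str.lower p.2 == "router")).map Prod.fst
  let switch_and_hubs := (device_id_map.filter (fun p =>
      PySem.Str.lower p.2 == "switch" || PySem.Str.lower p.2 == "hub")).map Prod.fst
  let pcs := (device_id_map.filter (fun p => PySem.Str.lower p.2 == "pc")).map Prod.fst
  -- full mesh among routers
  let st1 : List (List String) × PySem.Set (List String) :=
    (PySem.List.pyRange 0 (routers.length : Int) 1).foldl (fun st i =>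
      (PySem.List.pyRange (i + 1) (routers.length : Int) 1).foldl (fun st j =>
        grlStep st (PySem.List.pyGetD routers i "", PySem.List.pyGetD routers j "")) st)
      ([], PySem.Set.empty)
  -- attach each switch/hub to a router (router_index is the Int in the state)
  let st2 : List (List String) × PySem.Set (List String) × Int :=
    switch_and_hubs.foldl (grlSwitchStep routers) (st1.1, st1.2, (0 : Int))
  -- attach PCs to routers or switch/hubs (parent_index is the Int in the state)
  let parent_devices := switch_and_hubs ++ routers
  let st3 := pcs.foldl (fun st pc =>
      grlPcLoop parent_devices pc parent_devices.length (st.1, st.2.1, st.2.2))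
    (st2.1, st2.2.1, (0 : Int))
  st3.1

-- ===== PORT B =====
-- _mesh: head linked to every later router, then recurse on the tail
def grlMesh : List String → List (List String)
  | [] => []
  | h :: rest => rest.map (fun r2 => [h, r2]) ++ grlMesh rest

-- one-pass grouping by lowercased type (the loop body of B's first 'for')
def grlGroupStep (acc : List String × List String × List String) (p : String × String) :
    List String × List String × List String :=
  let t := PySem.Str.lower p.2
  if t == "router" then (acc.1 ++ [p.1], acc.2.1, acc.2.2)
  else if t == "switch" || t == "hub" then (acc.1, acc.2.1 ++ [p.1], acc.2.2)
  else if t == "pc" then (acc.1, acc.2.1, acc.2.2 ++ [p.1])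
  else acc

def generate_random_links_alt (device_id_map : List (String × String)) : List (List String) :=
  let g := device_id_map.foldl grlGroupStep ([], [], [])
  let routers := g.1
  let links1 := grlMesh routers
  let links2 :=
    if routers.isEmpty then links1
    else links1 ++ g.2.1.zipIdx.map (fun e =>
      [e.1, PySem.List.pyGetD routers (PySem.Int.mod (e.2 : Int) (routers.length : Int)) ""])
  let parents := g.2.1 ++ routers
  if parents.isEmpty then links2
  else links2 ++ g.2.2.zipIdx.map (fun e =>
    [e.1, PySem.List.pyGetD parents (PySem.Int.mod (e.2 : Int) (parents.length : Int)) ""])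

-- ===== PRECONDITION & SPEC =====
-- A's parameter is a Python dict, whose keys are necessarily distinct; Pre_ states exactly that
-- invariant of the association-list encoding (a list with duplicate keys encodes no dict input).
def Pre_generate_random_links (device_id_map : List (String × String)) : Prop :=
  (device_id_map.map Prod.fst).Nodup
instance (device_id_map : List (String × String)) : Decidable (Pre_generate_random_links device_id_map) := by
  unfold Pre_generate_random_links; infer_instance

def pvWitness_generate_random_links : (List (String × String)) :=
  [("r1", "router"), ("r2", "Router"), ("s1", "switch"), ("h1", "HUB"), ("p1", "pc"), ("p2", "PC")]

def Spec_generate_random_links (device_id_map : List (String × String)) (out : List (List String)) : Prop := out = generate_random_links_alt device_id_map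
instance (device_id_map : List (String × String)) (out : List (List String)) : Decidable (Spec_generate_random_links device_id_map out) := by unfold Spec_generate_random_links; infer_instance

-- ===== CLAIM (what is proved, stated in full; the proofs are below) =====
def Claim_equal_generate_random_links : Prop := ∀ (device_id_map : List (String × String)), Dom_generate_random_links device_id_map → Pre_generate_random_links device_id_map → Spec_generate_random_links device_id_map (generate_random_links device_id_map)

-- ===== LEMMAS AND PROOFS =====

-- ---- generic facts about grlKey ----
theorem mem_grlKey (z x y : String) : z ∈ grlKey x y ↔ z = x ∨ z = y := by
  unfold grlKey
  rw [PySem.List.mem_sorted]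
  simp

theorem grlKey_eq (x y : String) : grlKey x y = if x ≤ y then [x, y] else [y, x] := by
  unfold grlKey
  by_cases h : x ≤ y
  · rw [if_pos h]
    apply PySem.List.sorted_eq_self_of_pairwise
    simp [String.le_iff_toList_le.mp h]
  · rw [if_neg h]
    apply PySem.List.sorted_id_eq_of_perm_of_pairwise
    · exact List.Perm.swap' _ _ (List.Perm.refl _)
    · simp [String.le_iff_toList_le.mp (le_of_not_ge h)]

theorem grlKey_inj {a b c d : String} (h : grlKey a b = grlKey c d) :
    (a = c ∧ b = d) ∨ (a = d ∧ b = c) := by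
  rw [grlKey_eq, grlKey_eq] at h
  split_ifs at h with h1 h2 h2 <;>
    simp only [List.cons.injEq, and_true] at h <;>
    obtain ⟨e1, e2⟩ := h
  · exact Or.inl ⟨e1, e2⟩
  · exact Or.inr ⟨e1, e2⟩
  · exact Or.inr ⟨e2, e1⟩
  · exact Or.inl ⟨e2, e1⟩

-- ---- set primitives as list operations ----
theorem set_contains_iff {x : List String} {s : PySem.Set (List String)} :
    PySem.Set.contains s x = true ↔ x ∈ s := by
  simp [PySem.Set.contains]

theorem set_add_of_not_mem {x : List String} {s : PySem.Set (List String)} (h : x ∉ s) :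
    PySem.Set.add s x = s ++ [x] := by
  simp [PySem.Set.add, PySem.Set.contains, h]

-- ---- the candidate-pair list of the router mesh ----
def pairsOf : List String → List (String × String)
  | [] => []
  | h :: t => t.map (fun x => (h, x)) ++ pairsOf t

theorem mem_pairsOf {p : String × String} : ∀ {rs : List String}, p ∈ pairsOf rs → p.1 ∈ rs ∧ p.2 ∈ rs := by
  intro rs
  induction rs with
  | nil => simp [pairsOf]
  | cons h t ih =>
    intro hp
    rcases List.mem_append.mp hp with hl | hr
    · obtain ⟨x, hx, rfl⟩ := List.mem_map.mp hl
      exact ⟨List.mem_cons_self, List.mem_cons_of_mem _ hx⟩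
    · exact ⟨List.mem_cons_of_mem _ (ih hr).1, List.mem_cons_of_mem _ (ih hr).2⟩

theorem grlMesh_eq_pairs (rs : List String) :
    grlMesh rs = (pairsOf rs).map (fun p => [p.1, p.2]) := by
  induction rs with
  | nil => rfl
  | cons h t ih => simp [grlMesh, pairsOf, ih, List.map_map, Function.comp]

theorem pairs_keys_nodup : ∀ {rs : List String}, rs.Nodup →
    ((pairsOf rs).map (fun p => grlKey p.1 p.2)).Nodup := by
  intro rs
  induction rs with
  | nil => simp [pairsOf]
  | cons h t ih =>
    intro hnd
    obtain ⟨hht, hndt⟩ := List.nodup_cons.mp hnd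
    simp only [pairsOf, List.map_append, List.map_map, Function.comp_def]
    apply List.Nodup.append
    · apply List.Nodup.map_on _ hndt
      intro x hx y hy he
      rcases grlKey_inj he with ⟨_, e⟩ | ⟨e1, e2⟩
      · exact e
      · exact e2.trans e1
    · exact ih hndt
    · intro k hk1 hk2
      obtain ⟨x, _, rfl⟩ := List.mem_map.mp hk1
      obtain ⟨q, hq, he⟩ := List.mem_map.mp hk2
      have hhm : h ∈ grlKey q.1 q.2 := by
        rw [he]; exact (mem_grlKey _ _ _).mpr (Or.inl rfl)
      rcases (mem_grlKey _ _ _).mp hhm with e | e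
      · exact hht (e ▸ (mem_pairsOf hq).1)
      · exact hht (e ▸ (mem_pairsOf hq).2)

-- ---- the guarded fold, when no collision can occur ----
theorem guardFold : ∀ (cs : List (String × String)) (links : List (List String))
    (seen : PySem.Set (List String)),
    (∀ p ∈ cs, grlKey p.1 p.2 ∉ seen) →
    ((cs.map (fun p => grlKey p.1 p.2)).Nodup) →
    cs.foldl grlStep (links, seen) =
      (links ++ cs.map (fun p => [p.1, p.2]), seen ++ cs.map (fun p => grlKey p.1 p.2)) := by
  intro cs
  induction cs with
  | nil => simp
  | cons c t ih =>
    intro links seen h1 h2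
    have hnm : c ∈ c :: t := List.mem_cons_self
    have hcs : PySem.Set.contains seen (grlKey c.1 c.2) = false := by
      rw [Bool.eq_false_iff, Ne, set_contains_iff]; exact h1 c hnm
    simp only [List.foldl_cons, grlStep, hcs, Bool.false_eq_true, if_false]
    rw [set_add_of_not_mem (h1 c hnm)]
    rw [ih _ _ ?_ (List.nodup_cons.mp h2).2]
    · simp
    · intro p hp hmem
      rcases List.mem_append.mp hmem with hl | hr
      · exact h1 p (List.mem_cons_of_mem _ hp) hl
      · have : grlKey p.1 p.2 = grlKey c.1 c.2 := by simpa using hr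
        exact (List.nodup_cons.mp h2).1 (List.mem_map.mpr ⟨p, hp, this⟩)

-- ---- index folds reduced to list folds ----
theorem foldl_range_getD {α σ : Type} (d : α) (f : σ → α → σ) :
    ∀ (xs : List α) (st : σ),
    (List.range xs.length).foldl (fun st k => f st (xs.getD k d)) st = xs.foldl f st := by
  intro xs
  induction xs with
  | nil => simp
  | cons h t ih =>
    intro st
    rw [List.length_cons, List.range_succ_eq_map, List.foldl_cons, List.foldl_map]
    simpa using ih (f st h)

theorem foldl_pyRange_drop {σ : Type} (f : σ → String → σ) (rs : List String) (a : Nat) (st : σ) :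
    (PySem.List.pyRange (a : Int) (rs.length : Int) 1).foldl
      (fun st j => f st (PySem.List.pyGetD rs j "")) st = (rs.drop a).foldl f st := by
  rw [PySem.List.pyRange_one, List.foldl_map]
  have hlen : ((rs.length : Int) - (a : Int)).toNat = (rs.drop a).length := by
    rw [List.length_drop]; omega
  rw [hlen]
  refine Eq.trans (List.foldl_ext _ (fun st k => f st ((rs.drop a).getD k "")) st ?_)
    (foldl_range_getD "" f (rs.drop a) st)
  intro st k _
  have h1 : (a : Int) + (k : Int) = ((a + k : Nat) : Int) := by push_cast; ring
  rw [h1, PySem.List.pyGetD_natCast]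
  simp [List.getD_eq_getElem?_getD, List.getElem?_drop]

-- ---- the A-side mesh double loop is the fold of grlStep over pairsOf ----
theorem meshSuffix (rs : List String) :
    ∀ (dk a : Nat), rs.length - a = dk → ∀ (st : List (List String) × PySem.Set (List String)),
    (PySem.List.pyRange (a : Int) (rs.length : Int) 1).foldl (fun st i =>
      (PySem.List.pyRange (i + 1) (rs.length : Int) 1).foldl (fun st j =>
        grlStep st (PySem.List.pyGetD rs i "", PySem.List.pyGetD rs j "")) st) st
    = (pairsOf (rs.drop a)).foldl grlStep st := by
  intro dk
  induction dk with
  | zero =>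
    intro a ha st
    have hd : rs.drop a = [] := List.drop_eq_nil_of_le (by omega)
    rw [PySem.List.pyRange_one]
    have : ((rs.length : Int) - (a : Int)).toNat = 0 := by simp; omega
    rw [this]
    simp [hd, pairsOf]
  | succ n ih =>
    intro a ha st
    have halt : a < rs.length := by omega
    have hcons : PySem.List.pyRange (a : Int) (rs.length : Int) 1
        = (a : Int) :: PySem.List.pyRange ((a : Int) + 1) (rs.length : Int) 1 := by
      exact PySem.List.pyRange_one_cons (by exact_mod_cast halt)
    rw [hcons, List.foldl_cons]
    have ha1 : ((a : Int) + 1) = ((a + 1 : Nat) : Int) := by push_cast; ring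
    -- the first outer iteration
    have hget : PySem.List.pyGetD rs (a : Int) "" = rs[a] :=
      PySem.List.pyGetD_eq_getElem rs "" (by positivity) (by exact_mod_cast halt)
    have hinner : ∀ st, (PySem.List.pyRange ((a : Int) + 1) (rs.length : Int) 1).foldl
        (fun st j => grlStep st (PySem.List.pyGetD rs (a : Int) "", PySem.List.pyGetD rs j "")) st
        = (rs.drop (a + 1)).foldl (fun st r2 => grlStep st (rs[a], r2)) st := by
      intro st
      simp only [hget]
      rw [ha1]
      exact foldl_pyRange_drop (fun st r2 => grlStep st (rs[a], r2)) rs (a + 1) st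
    rw [hinner, ha1, ih (a + 1) (by omega) _]
    have hdrop : rs.drop a = rs[a] :: rs.drop (a + 1) := (List.getElem_cons_drop halt).symm
    rw [hdrop]
    simp only [pairsOf, List.foldl_append, List.foldl_map]

-- ---- B's zipIdx maps as round-robin lists, and the A-side phase-2/3 folds ----
def rrOf (parents : List String) : Int → List String → List (String × String)
  | _, [] => []
  | k, x :: xs =>
    (x, PySem.List.pyGetD parents (PySem.Int.mod k (parents.length : Int)) "")
      :: rrOf parents (k + 1) xs

theorem zipIdx_map_rr (parents : List String) :
    ∀ (xs : List String) (k : Nat),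
    (xs.zipIdx k).map (fun e =>
        [e.1, PySem.List.pyGetD parents (PySem.Int.mod (e.2 : Int) (parents.length : Int)) ""])
      = (rrOf parents (k : Int) xs).map (fun p => [p.1, p.2]) := by
  intro xs
  induction xs with
  | nil => intro k; rfl
  | cons x t ih =>
    intro k
    have hc : ((k : Int) + 1) = ((k + 1 : Nat) : Int) := by push_cast; ring
    simp only [List.zipIdx_cons, List.map_cons, rrOf, hc, ih (k + 1)]

theorem rr_mem_parent {parents : List String} (hne : parents ≠ []) :
    ∀ {xs : List String} {k : Int} {p : String × String},
    p ∈ rrOf parents k xs → p.1 ∈ xs ∧ p.2 ∈ parents := by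
  intro xs
  induction xs with
  | nil => intro k p h; simp [rrOf] at h
  | cons x t ih =>
    intro k p h
    have hlen : 0 < (parents.length : Int) := by
      have := List.length_pos_iff.mpr hne; exact_mod_cast this
    rcases List.mem_cons.mp h with rfl | hm
    · refine ⟨List.mem_cons_self, ?_⟩
      rw [PySem.List.pyGetD_eq_getElem parents ""
        (PySem.Int.mod_nonneg _ hlen) (by exact PySem.Int.mod_lt _ hlen)]
      exact List.getElem_mem _
    · exact ⟨List.mem_cons_of_mem _ (ih hm).1, (ih hm).2⟩

-- phase 2: the switch/hub fold, when routers is nonempty and nothing collides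
theorem phase2 (routers : List String) (hne : routers.isEmpty = false) :
    ∀ (xs : List String) (links : List (List String)) (seen : PySem.Set (List String)) (k : Int),
    xs.Nodup → (∀ x ∈ xs, x ∉ routers) → (∀ x ∈ xs, ∀ l ∈ seen, x ∉ l) →
    xs.foldl (grlSwitchStep routers) (links, seen, k)
    = (links ++ (rrOf routers k xs).map (fun p => [p.1, p.2]),
       seen ++ (rrOf routers k xs).map (fun p => grlKey p.1 p.2),
       k + (xs.length : Int)) := by
  intro xs
  induction xs with
  | nil => intro links seen k _ _ _; simp [rrOf]
  | cons x t ih =>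
    intro links seen k hnd hnr hseen
    have hner : routers ≠ [] := by simpa [List.isEmpty_iff] using hne
    have hlen : 0 < (routers.length : Int) := by
      exact_mod_cast List.length_pos_iff.mpr hner
    have hrmem : PySem.List.pyGetD routers (PySem.Int.mod k (routers.length : Int)) "" ∈ routers := by
      rw [PySem.List.pyGetD_eq_getElem routers "" (PySem.Int.mod_nonneg _ hlen) (PySem.Int.mod_lt _ hlen)]
      exact List.getElem_mem _
    set r := PySem.List.pyGetD routers (PySem.Int.mod k (routers.length : Int)) "" with hr
    have hknot : grlKey x r ∉ seen := fun hmem =>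
      (hseen x List.mem_cons_self _ hmem) ((mem_grlKey x x r).mpr (Or.inl rfl))
    have hcontains : PySem.Set.contains seen (grlKey x r) = false := by
      rw [Bool.eq_false_iff, Ne, set_contains_iff]; exact hknot
    rw [List.foldl_cons]
    have hstep : grlSwitchStep routers (links, seen, k) x
        = (links ++ [[x, r]], seen ++ [grlKey x r], k + 1) := by
      simp only [grlSwitchStep, hne, Bool.false_eq_true, if_false, grlStep, ← hr, hcontains]
      rw [set_add_of_not_mem hknot]
    rw [hstep]
    rw [ih (links ++ [[x, r]]) (seen ++ [grlKey x r]) (k + 1) (List.nodup_cons.mp hnd).2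
      (fun y hy => hnr y (List.mem_cons_of_mem _ hy)) ?later]
    case later =>
      intro y hy l hl
      rcases List.mem_append.mp hl with hl | hl
      · exact hseen y (List.mem_cons_of_mem _ hy) l hl
      · have : l = grlKey x r := by simpa using hl
        subst this
        intro hmem
        rcases (mem_grlKey y x r).mp hmem with e | e
        · exact (List.nodup_cons.mp hnd).1 (e ▸ hy)
        · exact hnr y (List.mem_cons_of_mem _ hy) (e.symm ▸ hrmem)
    rw [List.append_assoc, List.append_assoc]
    refine congrArg₂ _ ?_ (congrArg₂ _ ?_ ?_)
    · show links ++ ([[x, r]] ++ (rrOf routers (k + 1) t).map _) = _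
      rw [show rrOf routers k (x :: t) = (x, r) :: rrOf routers (k + 1) t from rfl]
      simp
    · rw [show rrOf routers k (x :: t) = (x, r) :: rrOf routers (k + 1) t from rfl]
      simp
    · simp only [List.length_cons]
      push_cast
      ring

-- phase 3: one PC probe succeeds immediately
theorem grlPcLoop_hit (parents : List String) (pc : String) (n : Nat)
    (links : List (List String)) (seen : PySem.Set (List String)) (k : Int)
    (h : grlKey pc (PySem.List.pyGetD parents (PySem.Int.mod k (parents.length : Int)) "") ∉ seen) :
    grlPcLoop parents pc (n + 1) (links, seen, k) =
      (links ++ [[pc, PySem.List.pyGetD parents (PySem.Int.mod k (parents.length : Int)) ""]],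
       seen ++ [grlKey pc (PySem.List.pyGetD parents (PySem.Int.mod k (parents.length : Int)) "")],
       k + 1) := by
  have hcontains : PySem.Set.contains seen (grlKey pc
      (PySem.List.pyGetD parents (PySem.Int.mod k (parents.length : Int)) "")) = false := by
    rw [Bool.eq_false_iff, Ne, set_contains_iff]; exact h
  simp only [grlPcLoop, hcontains, Bool.false_eq_true, if_false]
  rw [set_add_of_not_mem h]

theorem phase3 (parents : List String) (hne : parents ≠ []) :
    ∀ (xs : List String) (links : List (List String)) (seen : PySem.Set (List String)) (k : Int),
    xs.Nodup → (∀ x ∈ xs, x ∉ parents) → (∀ x ∈ xs, ∀ l ∈ seen, x ∉ l) →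
    xs.foldl (fun st pc => grlPcLoop parents pc parents.length (st.1, st.2.1, st.2.2)) (links, seen, k)
    = (links ++ (rrOf parents k xs).map (fun p => [p.1, p.2]),
       seen ++ (rrOf parents k xs).map (fun p => grlKey p.1 p.2),
       k + (xs.length : Int)) := by
  intro xs
  induction xs with
  | nil => intro links seen k _ _ _; simp [rrOf]
  | cons x t ih =>
    intro links seen k hnd hnr hseen
    have hlen : 0 < (parents.length : Int) := by
      exact_mod_cast List.length_pos_iff.mpr hne
    have hrmem : PySem.List.pyGetD parents (PySem.Int.mod k (parents.length : Int)) "" ∈ parents := by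
      rw [PySem.List.pyGetD_eq_getElem parents "" (PySem.Int.mod_nonneg _ hlen) (PySem.Int.mod_lt _ hlen)]
      exact List.getElem_mem _
    set r := PySem.List.pyGetD parents (PySem.Int.mod k (parents.length : Int)) "" with hr
    have hknot : grlKey x r ∉ seen := fun hmem =>
      (hseen x List.mem_cons_self _ hmem) ((mem_grlKey x x r).mpr (Or.inl rfl))
    obtain ⟨np, hnp⟩ : ∃ np, parents.length = np + 1 :=
      ⟨parents.length - 1, by have := List.length_pos_iff.mpr hne; omega⟩
    rw [List.foldl_cons]
    have hhead : grlPcLoop parents x parents.length (links, seen, k)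
        = (links ++ [[x, r]], seen ++ [grlKey x r], k + 1) := by
      rw [hnp, hr]
      exact grlPcLoop_hit parents x np links seen k (hr ▸ hknot)
    show t.foldl _ (grlPcLoop parents x parents.length (links, seen, k)) = _
    rw [hhead]
    rw [ih (links ++ [[x, r]]) (seen ++ [grlKey x r]) (k + 1) (List.nodup_cons.mp hnd).2
      (fun y hy => hnr y (List.mem_cons_of_mem _ hy)) ?later]
    case later =>
      intro y hy l hl
      rcases List.mem_append.mp hl with hl | hl
      · exact hseen y (List.mem_cons_of_mem _ hy) l hl
      · have : l = grlKey x r := by simpa using hl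
        subst this
        intro hmem
        rcases (mem_grlKey y x r).mp hmem with e | e
        · exact (List.nodup_cons.mp hnd).1 (e ▸ hy)
        · exact hnr y (List.mem_cons_of_mem _ hy) (e.symm ▸ hrmem)
    rw [List.append_assoc, List.append_assoc]
    refine congrArg₂ _ ?_ (congrArg₂ _ ?_ ?_)
    · rw [show rrOf parents k (x :: t) = (x, r) :: rrOf parents (k + 1) t from rfl]
      simp
    · rw [show rrOf parents k (x :: t) = (x, r) :: rrOf parents (k + 1) t from rfl]
      simp
    · simp only [List.length_cons]
      push_cast
      omega


-- ---- grouping: B's single pass equals A's three filters ----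
def rsOf (m : List (String × String)) : List String :=
  (m.filter (fun p => PySem.Str.lower p.2 == "router")).map Prod.fst
def shOf (m : List (String × String)) : List String :=
  (m.filter (fun p => PySem.Str.lower p.2 == "switch" || PySem.Str.lower p.2 == "hub")).map Prod.fst
def pcOf (m : List (String × String)) : List String :=
  (m.filter (fun p => PySem.Str.lower p.2 == "pc")).map Prod.fst

theorem groupFold : ∀ (m : List (String × String)) (acc : List String × List String × List String),
    m.foldl grlGroupStep acc = (acc.1 ++ rsOf m, acc.2.1 ++ shOf m, acc.2.2 ++ pcOf m) := by
  intro m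
  induction m with
  | nil => intro acc; simp [rsOf, shOf, pcOf]
  | cons p t ih =>
    intro acc
    rw [List.foldl_cons, ih]
    by_cases h1 : PySem.Str.lower p.2 = "router"
    · simp [grlGroupStep, rsOf, shOf, pcOf, h1]
    · by_cases h2 : PySem.Str.lower p.2 = "switch"
      · simp [grlGroupStep, rsOf, shOf, pcOf, h2]
      · by_cases h3 : PySem.Str.lower p.2 = "hub"
        · simp [grlGroupStep, rsOf, shOf, pcOf, h3]
        · by_cases h4 : PySem.Str.lower p.2 = "pc"
          · simp [grlGroupStep, rsOf, shOf, pcOf, h4]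
          · simp [grlGroupStep, rsOf, shOf, pcOf, h1, h2, h3, h4]

-- ---- consequences of distinct dict keys ----
theorem nodup_group (m : List (String × String)) (h : (m.map Prod.fst).Nodup)
    (P : String × String → Bool) : ((m.filter P).map Prod.fst).Nodup :=
  h.sublist (List.Sublist.map Prod.fst List.filter_sublist)

theorem disj_group (m : List (String × String)) (h : (m.map Prod.fst).Nodup)
    (P Q : String × String → Bool) (hpq : ∀ p, ¬(P p = true ∧ Q p = true)) :
    ∀ x ∈ (m.filter P).map Prod.fst, x ∉ (m.filter Q).map Prod.fst := by
  intro x hx hy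
  obtain ⟨p, hp, rfl⟩ := List.mem_map.mp hx
  obtain ⟨q, hq, he⟩ := List.mem_map.mp hy
  have hqp : q = p := List.inj_on_of_nodup_map h (List.mem_of_mem_filter hq) (List.mem_of_mem_filter hp) he
  subst hqp
  exact hpq q ⟨List.of_mem_filter hp, List.of_mem_filter hq⟩

-- keys whose members all lie in S are never hit by an element outside S
theorem seen_inv_keys (xs : List (String × String)) (S : List String)
    (hmem : ∀ p ∈ xs, p.1 ∈ S ∧ p.2 ∈ S) :
    ∀ x, x ∉ S → ∀ l ∈ xs.map (fun p => grlKey p.1 p.2), x ∉ l := by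
  intro x hx l hl hxl
  obtain ⟨p, hp, rfl⟩ := List.mem_map.mp hl
  rcases (mem_grlKey x p.1 p.2).mp hxl with e | e
  · exact hx (e ▸ (hmem p hp).1)
  · exact hx (e ▸ (hmem p hp).2)

theorem foldl_skip {α σ : Type} (g : σ → α → σ) (hg : ∀ st x, g st x = st) :
    ∀ (xs : List α) (st : σ), xs.foldl g st = st := by
  intro xs
  induction xs with
  | nil => intro st; rfl
  | cons x t ih => intro st; rw [List.foldl_cons, hg]; exact ih st

-- ---- the two ports agree on every dict input ----
theorem ports_eq (m : List (String × String)) (hpre : (m.map Prod.fst).Nodup) :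
    generate_random_links m = generate_random_links_alt m := by
  have hrw1 : (m.filter (fun p => PySem.Str.lower p.2 == "router")).map Prod.fst = rsOf m := rfl
  have hrw2 : (m.filter (fun p =>
      PySem.Str.lower p.2 == "switch" || PySem.Str.lower p.2 == "hub")).map Prod.fst = shOf m := rfl
  have hrw3 : (m.filter (fun p => PySem.Str.lower p.2 == "pc")).map Prod.fst = pcOf m := rfl
  simp only [generate_random_links, generate_random_links_alt]
  rw [hrw1, hrw2, hrw3, groupFold m ([], [], [])]
  simp only [List.nil_append]
  -- facts from distinct keys
  have hrs_nd : (rsOf m).Nodup := nodup_group m hpre _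
  have hsh_nd : (shOf m).Nodup := nodup_group m hpre _
  have hpc_nd : (pcOf m).Nodup := nodup_group m hpre _
  have hsh_rs : ∀ x ∈ shOf m, x ∉ rsOf m := by
    apply disj_group m hpre
    intro p ⟨ha, hb⟩
    rcases Bool.or_eq_true_iff.mp ha with h | h <;>
      · rw [beq_iff_eq] at * ; rw [h] at hb; exact absurd hb (by decide)
  have hpc_rs : ∀ x ∈ pcOf m, x ∉ rsOf m := by
    apply disj_group m hpre
    intro p ⟨ha, hb⟩
    rw [beq_iff_eq] at * ; rw [ha] at hb; exact absurd hb (by decide)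
  have hpc_sh : ∀ x ∈ pcOf m, x ∉ shOf m := by
    apply disj_group m hpre
    intro p ⟨ha, hb⟩
    rw [beq_iff_eq] at ha
    rcases Bool.or_eq_true_iff.mp hb with h | h <;>
      · rw [beq_iff_eq] at h ; rw [ha] at h; exact absurd h (by decide)
  -- phase 1: the mesh
  have hmesh := meshSuffix (rsOf m) (rsOf m).length 0 (by omega) ([], PySem.Set.empty)
  simp only [Nat.cast_zero, List.drop_zero] at hmesh
  rw [hmesh, guardFold (pairsOf (rsOf m)) [] PySem.Set.empty
      (by intro p hp hmem; simp [PySem.Set.empty] at hmem) (pairs_keys_nodup hrs_nd)]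
  simp only [List.nil_append]
  set keys1 := (pairsOf (rsOf m)).map (fun p => grlKey p.1 p.2) with hkeys1def
  have hkeys1 : ∀ x, x ∉ rsOf m → ∀ l ∈ keys1, x ∉ l := by
    intro x hx
    exact seen_inv_keys _ _ (fun p hp => mem_pairsOf hp) x hx
  rw [grlMesh_eq_pairs]
  by_cases hre : (rsOf m).isEmpty
  · -- no routers: switch phase is a no-op on both sides
    rw [foldl_skip _ (by intro st x; simp [grlSwitchStep, hre]) (shOf m)]
    simp only [hre, if_true]
    by_cases hpe : (shOf m ++ rsOf m).isEmpty
    · have h0 : (shOf m ++ rsOf m).length = 0 := by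
        rw [List.isEmpty_iff] at hpe; rw [hpe]; rfl
      rw [h0, foldl_skip _ (by intro st x; rfl) (pcOf m)]
      simp [hpe]
    · have hpne : shOf m ++ rsOf m ≠ [] := by simpa [List.isEmpty_iff] using hpe
      rw [phase3 _ hpne (pcOf m) _ _ 0 hpc_nd
        (by intro x hx hmem
            rcases List.mem_append.mp hmem with h | h
            · exact hpc_sh x hx h
            · exact hpc_rs x hx h)
        (by intro x hx l hl; exact hkeys1 x (hpc_rs x hx) l hl)]
      simp only [hpe, Bool.false_eq_true, if_false]
      rw [zipIdx_map_rr]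
      simp
  · -- routers present
    have hre' : (rsOf m).isEmpty = false := Bool.eq_false_iff.mpr hre
    rw [phase2 (rsOf m) hre' (shOf m) _ _ 0 hsh_nd hsh_rs
      (by intro x hx l hl; exact hkeys1 x (hsh_rs x hx) l hl)]
    have hrsne : rsOf m ≠ [] := by simpa [List.isEmpty_iff] using hre
    have hpne : shOf m ++ rsOf m ≠ [] := by
      simp [hrsne]
    have hpe' : (shOf m ++ rsOf m).isEmpty = false := by
      rw [Bool.eq_false_iff, Ne, List.isEmpty_iff]; exact hpne
    rw [phase3 _ hpne (pcOf m) _ _ 0 hpc_nd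
      (by intro x hx hmem
          rcases List.mem_append.mp hmem with h | h
          · exact hpc_sh x hx h
          · exact hpc_rs x hx h)
      (by intro x hx l hl
          rcases List.mem_append.mp hl with h | h
          · exact hkeys1 x (hpc_rs x hx) l h
          · refine seen_inv_keys (rrOf (rsOf m) 0 (shOf m)) (shOf m ++ rsOf m) ?_ x ?_ l h
            · intro p hp
              have := rr_mem_parent hrsne hp
              exact ⟨List.mem_append.mpr (Or.inl this.1), List.mem_append.mpr (Or.inr this.2)⟩
            · intro hmem
              rcases List.mem_append.mp hmem with h' | h'
              · exact hpc_sh x hx h'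
              · exact hpc_rs x hx h')]
    simp only [hre', hpe', Bool.false_eq_true, if_false]
    rw [zipIdx_map_rr, zipIdx_map_rr]
    simp [List.append_assoc]

-- ===== VERDICT (by name: the statement is the Claim_ definition above) =====
theorem generate_random_links_spec : Claim_equal_generate_random_links := by
  intro m _hdom hpre
  unfold Spec_generate_random_links
  exact ports_eq m hpre
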